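-- pv_equiv track=rewrite | github.com/ggidtyd/cote | 프로그래머스/LV3/코딩테스트 연습/월간 코드 챌린지 시즌1/스타 수열/스타 수열.py | solution
-- ===== SOURCE A (Python) =====
-- def solution(a):
--     dic = {n : [0, -1] for n in list(set(a))}
--     c = 0
--
--     for i in range(len(a)):
--         if i > 0 and dic[a[i]][1] != i-1 and a[i-1] != a[i]:
--             dic[a[i]][0] += 1
--             dic[a[i]][1] = i-1
--         elif i < len(a)-1 and a[i] != a[i+1]:
--             dic[a[i]][0] += 1
--             dic[a[i]][1] = i+1
--         c = max(c, dic[a[i]][0])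
--
--     return c * 2 if len(a) >= c * 2 else (len(a) - c) * 2
-- ===== SOURCE B (Python) =====
-- def solution(a):
--     best = 0
--     for x in set(a):
--         cnt = 0
--         i = 0
--         while i < len(a) - 1:
--             if (a[i] == x or a[i + 1] == x) and a[i] != a[i + 1]:
--                 cnt += 1
--                 i += 2
--             else:
--                 i += 1
--         best = max(best, cnt)
--     return best * 2
-- ===== Notes on version B (the rewrite author's own statement) =====
-- stated objective: alternative
-- what changed: Replaces A's single fused pass over the array (a dict of (count, last-used-index) per value, with a final clamp) by the standard formulation: for each distinct candidate star value an independent greedy two-pointer scan counts non-overlapping pairs, and the maximum count times two is returned with no clamp.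
import Mathlib
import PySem

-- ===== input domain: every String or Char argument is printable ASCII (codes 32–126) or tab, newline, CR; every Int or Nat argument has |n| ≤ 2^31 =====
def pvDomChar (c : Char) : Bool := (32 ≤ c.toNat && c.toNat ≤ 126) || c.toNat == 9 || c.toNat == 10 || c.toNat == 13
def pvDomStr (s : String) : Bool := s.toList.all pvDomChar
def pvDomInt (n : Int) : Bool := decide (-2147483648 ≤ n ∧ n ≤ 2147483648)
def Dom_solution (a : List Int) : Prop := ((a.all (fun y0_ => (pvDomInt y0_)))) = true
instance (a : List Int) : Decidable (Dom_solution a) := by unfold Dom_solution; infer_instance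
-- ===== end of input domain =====

-- B replaces A's fused one-pass dict-of-(count,last) scan with an independent greedy
-- two-pointer scan per distinct candidate value (alternative algorithm, not claimed faster).

-- ===== PORT A =====
-- All a[...] reads in A's loop are in range in Python (a[i-1] at i = 0 is Python's
-- a[-1], which pyGetD also reads as the last element), so pyGetD is exact here.
def solutionStep (a : List Int) (st : PySem.Dict Int (Int × Int) × Int) (i : Int) :
    PySem.Dict Int (Int × Int) × Int :=
  let dic := st.1
  let c := st.2
  let ai := PySem.List.pyGetD a i 0
  let p := (dic.get? ai).getD (0, -1)
  if i > 0 ∧ p.2 ≠ i - 1 ∧ PySem.List.pyGetD a (i - 1) 0 ≠ ai then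
    (dic.insert ai (p.1 + 1, i - 1), max c (p.1 + 1))
  else if i < (a.length : Int) - 1 ∧ ai ≠ PySem.List.pyGetD a (i + 1) 0 then
    (dic.insert ai (p.1 + 1, i + 1), max c (p.1 + 1))
  else (dic, max c p.1)

def solution (a : List Int) : Int :=
  let dic0 : PySem.Dict Int (Int × Int) :=
    (PySem.Set.ofList a).foldl (fun d n => d.insert n ((0 : Int), (-1 : Int))) PySem.Dict.empty
  let res := (PySem.List.pyRange 0 (a.length : Int) 1).foldl (solutionStep a) (dic0, 0)
  if (a.length : Int) ≥ res.2 * 2 then res.2 * 2 else ((a.length : Int) - res.2) * 2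

-- ===== PORT B =====
-- while i < len(a) - 1 (i stays ≥ 0, so the test is i + 1 < len(a))
def solutionAltCount (a : List Int) (x : Int) (i : Nat) (cnt : Int) : Int :=
  if h : i + 1 < a.length then
    if (PySem.List.pyGetD a (i : Int) 0 = x ∨ PySem.List.pyGetD a ((i : Int) + 1) 0 = x) ∧
        PySem.List.pyGetD a (i : Int) 0 ≠ PySem.List.pyGetD a ((i : Int) + 1) 0 then
      solutionAltCount a x (i + 2) (cnt + 1)
    else
      solutionAltCount a x (i + 1) cnt
  else cnt
termination_by a.length - i

def solution_alt (a : List Int) : Int :=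
  ((PySem.Set.ofList a).foldl (fun best x => max best (solutionAltCount a x 0 0)) 0) * 2

-- ===== PRECONDITION & SPEC =====
def Spec_solution (a : List Int) (out : Int) : Prop := out = solution_alt a
instance (a : List Int) (out : Int) : Decidable (Spec_solution a out) := by unfold Spec_solution; infer_instance

-- ===== CLAIM (what is proved, stated in full; the proofs are below) =====
def Claim_equal_solution : Prop := ∀ (a : List Int), Dom_solution a → Spec_solution a (solution a)

-- ===== LEMMAS AND PROOFS =====

-- B's greedy pair count, as a recursion on the remaining list (proof-side spec).
def gcount (x : Int) : List Int → Int
  | [] => 0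
  | [_] => 0
  | y :: z :: r => if (y = x ∨ z = x) ∧ y ≠ z then 1 + gcount x r else gcount x (z :: r)

-- A's per-value transition at index i, projected out of the shared dict.
def axStep (a : List Int) (x : Int) (i : Nat) (st : Int × Int) : Int × Int :=
  if PySem.List.pyGetD a (i : Int) 0 = x then
    (if (i : Int) > 0 ∧ st.2 ≠ (i : Int) - 1 ∧ PySem.List.pyGetD a ((i : Int) - 1) 0 ≠ x then
      (st.1 + 1, (i : Int) - 1)
    else if (i : Int) < (a.length : Int) - 1 ∧ x ≠ PySem.List.pyGetD a ((i : Int) + 1) 0 then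
      (st.1 + 1, (i : Int) + 1)
    else st)
  else st

-- run axStep for k consecutive indices starting at i
def axRunK (a : List Int) (x : Int) : Nat → Nat → (Int × Int) → Int × Int
  | 0, _, st => st
  | k + 1, i, st => axRunK a x k (i + 1) (axStep a x i st)

-- A's per-value machine abstracted to two booleans:
-- pOk = "a left pair with the previous element is available", hc = "the current head is consumed".
def acount (x : Int) (pOk hc : Bool) : List Int → Int
  | [] => 0
  | [y] => if y = x ∧ pOk = true then 1 else 0
  | y :: z :: r =>
    if y = x ∧ pOk = true then 1 + acount x false false (z :: r)
    else if y = x ∧ z ≠ x then 1 + acount x false true (z :: r)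
    else acount x (decide (y ≠ x) && !hc) false (z :: r)

def pOkB (a : List Int) (x : Int) (i : Nat) (last : Int) : Bool :=
  decide ((i : Int) > 0 ∧ last ≠ (i : Int) - 1 ∧ PySem.List.pyGetD a ((i : Int) - 1) 0 ≠ x)

def auxg (x : Int) : List Int → Int
  | [] => 0
  | y :: r => if y = x then 1 + gcount x r else gcount x (y :: r)

lemma pyGetD_idx (a : List Int) (i : Nat) (h : i < a.length) :
    PySem.List.pyGetD a (i : Int) 0 = a[i] := by
  simp [PySem.List.pyGetD_natCast, List.getD_eq_getElem?_getD, List.getElem?_eq_getElem h]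

-- foldl max toolkit
lemma foldl_max_le_iff (L : List Int) (b X : Int) :
    L.foldl max b ≤ X ↔ b ≤ X ∧ ∀ u ∈ L, u ≤ X := by
  induction L generalizing b with
  | nil => simp
  | cons y L ih =>
    simp only [List.foldl_cons, ih, List.mem_cons, max_le_iff]
    constructor
    · rintro ⟨⟨hb, hy⟩, h⟩; exact ⟨hb, fun u hu => by rcases hu with rfl | hu; exact hy; exact h u hu⟩
    · rintro ⟨hb, h⟩
      exact ⟨⟨hb, h y (Or.inl rfl)⟩, fun u hu => h u (Or.inr hu)⟩

lemma le_foldl_max_base (L : List Int) (b : Int) : b ≤ L.foldl max b :=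
  ((foldl_max_le_iff L b _).1 le_rfl).1

lemma le_foldl_max_mem (L : List Int) (b v : Int) (hv : v ∈ L) : v ≤ L.foldl max b :=
  ((foldl_max_le_iff L b _).1 le_rfl).2 v hv

lemma foldl_max_congr (L L' : List Int) (b : Int) (h : ∀ v, v ∈ L ↔ v ∈ L') :
    L.foldl max b = L'.foldl max b := by
  apply le_antisymm
  · exact (foldl_max_le_iff _ _ _).2 ⟨le_foldl_max_base _ _,
      fun u hu => le_foldl_max_mem _ _ _ ((h u).1 hu)⟩
  · exact (foldl_max_le_iff _ _ _).2 ⟨le_foldl_max_base _ _,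
      fun u hu => le_foldl_max_mem _ _ _ ((h u).2 hu)⟩

lemma foldl_max_base_eq (L : List Int) (b v w : Int) (hwv : w ≤ v) (h : v ∈ L ∨ v = w) :
    L.foldl max (max b v) = L.foldl max (max b w) := by
  rcases h with hmem | rfl
  · apply le_antisymm
    · refine (foldl_max_le_iff _ _ _).2 ⟨max_le ?_ ?_, fun u hu => le_foldl_max_mem _ _ _ hu⟩
      · exact le_trans (le_max_left _ _) (le_foldl_max_base _ _)
      · exact le_foldl_max_mem _ _ _ hmem
    · refine (foldl_max_le_iff _ _ _).2 ⟨max_le ?_ ?_, fun u hu => le_foldl_max_mem _ _ _ hu⟩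
      · exact le_trans (le_max_left _ _) (le_foldl_max_base _ _)
      · exact le_trans (le_trans hwv (le_max_right b v)) (le_foldl_max_base _ _)
  · rfl


lemma acount_skip (x z : Int) (r : List Int) (hz : z ≠ x) :
    acount x false true (z :: r) = acount x false false r := by
  cases r with
  | nil => simp [acount, hz]
  | cons w r2 => simp [acount, hz]

lemma gcount_short (x : Int) (l : List Int) (h : l.length ≤ 1) : gcount x l = 0 := by
  match l, h with
  | [], _ => rfl
  | [y], _ => rfl

lemma acount_main (x : Int) :
    ∀ (n : Nat) (l : List Int), l.length ≤ n →
      acount x false false l = gcount x l ∧ acount x true false l = auxg x l := by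
  intro n
  induction n with
  | zero =>
    intro l hl
    have : l = [] := List.eq_nil_of_length_eq_zero (by omega)
    subst this; exact ⟨rfl, rfl⟩
  | succ n ih =>
    intro l hl
    match l with
    | [] => exact ⟨rfl, rfl⟩
    | [y] =>
      constructor
      · simp [acount, gcount]
      · by_cases hy : y = x <;> simp [acount, auxg, gcount, hy]
    | y :: z :: r =>
      simp only [List.length_cons] at hl
      have ih1 : acount x false false (z :: r) = gcount x (z :: r) ∧
          acount x true false (z :: r) = auxg x (z :: r) := ih _ (by simp; omega)
      have ih2 : acount x false false r = gcount x r := (ih r (by omega)).1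
      constructor
      · -- P
        by_cases hy : y = x
        · by_cases hz : z = x
          · -- both x: blocked, skip to z :: r
            subst hy; subst hz
            simp [acount, gcount, ih1.1]
          · -- right pair
            have hyz : y ≠ z := by rw [hy]; exact fun h => hz h.symm
            have hxz : x ≠ z := fun h => hz h.symm
            simp only [acount, gcount, hy, hz]
            simp [hyz, acount_skip x z r hz, ih2, hxz]
            exact fun h => absurd h hz
        · -- y ≠ x : pass prevOk = true
          simp only [acount, gcount, hy]
          have : (decide (y ≠ x) && !false) = true := by simp [hy]
          simp only [this]
          rw [ih1.2]
          by_cases hz : z = x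
          · have hyz : y ≠ z := fun h => hy (h.trans hz)
            simp [auxg, hy, hz, hyz, gcount]
          · simp [auxg, hy, hz, gcount]
      · -- Q
        by_cases hy : y = x
        · simp only [acount, auxg, hy]
          simp [ih1.1]
        · simp only [acount, auxg, hy]
          have : (decide (y ≠ x) && !false) = true := by simp [hy]
          simp only [this]
          rw [ih1.2]
          by_cases hz : z = x
          · have hyz : y ≠ z := fun h => hy (h.trans hz)
            simp [auxg, hy, hz, hyz, gcount]
          · simp [auxg, hy, hz, gcount]

lemma gcount_bounds (x : Int) :
    ∀ (n : Nat) (l : List Int), l.length ≤ n → 0 ≤ gcount x l ∧ 2 * gcount x l ≤ (l.length : Int) := by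
  intro n
  induction n with
  | zero =>
    intro l hl
    have : l = [] := List.eq_nil_of_length_eq_zero (by omega)
    subst this; simp [gcount]
  | succ n ih =>
    intro l hl
    match l with
    | [] => simp [gcount]
    | [y] => simp [gcount]
    | y :: z :: r =>
      simp only [List.length_cons] at hl
      have h1 := ih r (by omega)
      have h2 := ih (z :: r) (by simp; omega)
      simp only [gcount]
      split
      · simp only [List.length_cons]; push_cast; omega
      · simp only [List.length_cons] at h2 ⊢; push_cast at h2 ⊢; omega

lemma countBridge (a : List Int) (x : Int) :
    ∀ (n : Nat), ∀ (i : Nat) (cnt : Int), a.length ≤ i + n →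
      solutionAltCount a x i cnt = cnt + gcount x (a.drop i) := by
  intro n
  induction n using Nat.strong_induction_on with
  | _ n ih =>
    intro i cnt hn
    rw [solutionAltCount]
    by_cases h : i + 1 < a.length
    · rw [dif_pos h]
      have hi : i < a.length := by omega
      have hg1 : PySem.List.pyGetD a (i : Int) 0 = a[i] := pyGetD_idx a i hi
      have hg2 : PySem.List.pyGetD a ((i : Int) + 1) 0 = a[i + 1] := by
        have := pyGetD_idx a (i + 1) h; push_cast at this ⊢; exact this
      have hd1 : a.drop i = a[i] :: a.drop (i + 1) := List.drop_eq_getElem_cons hi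
      have hd2 : a.drop (i + 1) = a[i + 1] :: a.drop (i + 2) := List.drop_eq_getElem_cons h
      rw [hg1, hg2, hd1, hd2]
      have hn2 : 2 ≤ n := by omega
      by_cases hc : (a[i] = x ∨ a[i + 1] = x) ∧ a[i] ≠ a[i + 1]
      · rw [if_pos hc]
        rw [ih (n - 2) (by omega) (i + 2) (cnt + 1) (by omega)]
        simp only [gcount, if_pos hc]
        ring
      · rw [if_neg hc]
        rw [ih (n - 1) (by omega) (i + 1) cnt (by omega), hd2]
        simp only [gcount, if_neg hc]
    · rw [dif_neg h]
      rw [gcount_short x _ (by simp [List.length_drop]; omega)]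
      omega


lemma bis (a : List Int) (x : Int) :
    ∀ (k i : Nat), i + k = a.length → ∀ (cnt last : Int), last ≤ (i : Int) →
      (axRunK a x k i (cnt, last)).1 =
        cnt + acount x (pOkB a x i last) (decide (last = (i : Int))) (a.drop i) := by
  intro k
  induction k with
  | zero =>
    intro i hk cnt last _
    have : a.drop i = [] := by rw [List.drop_eq_nil_iff]; omega
    simp [axRunK, this, acount]
  | succ k ih =>
    intro i hk cnt last hlast
    have hi : i < a.length := by omega
    have hg : PySem.List.pyGetD a (i : Int) 0 = a[i] := pyGetD_idx a i hi
    have hd : a.drop i = a[i] :: a.drop (i + 1) := List.drop_eq_getElem_cons hi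
    simp only [axRunK, axStep, hg, hd]
    by_cases hyx : a[i] = x
    · simp only [if_pos hyx]
      by_cases hL : (i : Int) > 0 ∧ last ≠ (i : Int) - 1 ∧ PySem.List.pyGetD a ((i : Int) - 1) 0 ≠ x
      · -- left pair
        have hpok : pOkB a x i last = true := by simp only [pOkB]; exact decide_eq_true hL
        rw [if_pos hL]
        rcases hrest : a.drop (i + 1) with _ | ⟨z, r⟩
        · have hlen : i + 1 = a.length := by
            have := congrArg List.length hrest
            simp [List.length_drop] at this; omega
          have hk0 : k = 0 := by omega
          subst hk0
          simp [axRunK, hrest, acount, hyx, hpok]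
        · have h2 : i + 1 < a.length := by
            have := congrArg List.length hrest
            simp [List.length_drop] at this; omega
          rw [ih (i + 1) (by omega) (cnt + 1) ((i : Int) - 1) (by push_cast; omega)]
          have hpok' : pOkB a x (i + 1) ((i : Int) - 1) = false := by
            simp only [pOkB]
            have h3 : ((i + 1 : Nat) : Int) - 1 = (i : Int) := by push_cast; omega
            simp [h3, hg, hyx]
          have hhc' : decide (((i : Int) - 1) = ((i + 1 : Nat) : Int)) = false := by
            simp only [decide_eq_false_iff_not]; push_cast; omega
          rw [hpok', hhc', hrest]
          simp only [acount, hyx, hpok, true_and, if_pos trivial, and_self, if_true]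
          ring
      · rw [if_neg hL]
        have hpok : pOkB a x i last = false := by simp only [pOkB]; exact decide_eq_false hL
        by_cases hR : (i : Int) < (a.length : Int) - 1 ∧ x ≠ PySem.List.pyGetD a ((i : Int) + 1) 0
        · -- right pair
          rw [if_pos hR]
          have h2 : i + 1 < a.length := by have h := hR.1; omega
          have hg2 : PySem.List.pyGetD a ((i : Int) + 1) 0 = a[i + 1] := by
            have := pyGetD_idx a (i + 1) h2; push_cast at this ⊢; exact this
          have hzx : a[i + 1] ≠ x := by
            intro h; exact hR.2 (by rw [hg2, h])
          have hd2 : a.drop (i + 1) = a[i + 1] :: a.drop (i + 2) := List.drop_eq_getElem_cons h2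
          rw [ih (i + 1) (by omega) (cnt + 1) ((i : Int) + 1) (by push_cast; omega)]
          have hpok' : pOkB a x (i + 1) ((i : Int) + 1) = false := by
            simp only [pOkB]
            have h3 : ((i + 1 : Nat) : Int) - 1 = (i : Int) := by push_cast; omega
            simp [h3, hg, hyx]
          have hhc' : decide (((i : Int) + 1) = ((i + 1 : Nat) : Int)) = true := by
            simp only [decide_eq_true_iff]; push_cast; omega
          rw [hpok', hhc', hd2]
          simp only [acount, hyx, hpok, Bool.false_eq_true, and_false, if_false, hzx,
            ne_eq, not_false_iff, and_self, if_true, true_and]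
          rw [acount_skip x a[i + 1] (a.drop (i + 2)) hzx]
          ring
        · -- blocked
          rw [if_neg hR]
          rcases hrest : a.drop (i + 1) with _ | ⟨z, r⟩
          · have hlen : i + 1 = a.length := by
              have := congrArg List.length hrest
              simp [List.length_drop] at this; omega
            have hk0 : k = 0 := by omega
            subst hk0
            simp [axRunK, acount, hyx, hpok]
          · have h2 : i + 1 < a.length := by
              have := congrArg List.length hrest
              simp [List.length_drop] at this; omega
            have hg2 : PySem.List.pyGetD a ((i : Int) + 1) 0 = a[i + 1] := by
              have := pyGetD_idx a (i + 1) h2; push_cast at this ⊢; exact this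
            have hzz : z = a[i + 1] := by
              rw [List.drop_eq_getElem_cons h2] at hrest
              exact (List.cons_eq_cons.mp hrest).1.symm
            have hzx : z = x := by
              by_contra hne
              exact hR ⟨by omega, by rw [hg2, ← hzz]; exact fun h => hne h.symm⟩
            rw [ih (i + 1) (by omega) cnt last (by push_cast; omega)]
            have hpok' : pOkB a x (i + 1) last = false := by
              simp only [pOkB]
              have h3 : ((i + 1 : Nat) : Int) - 1 = (i : Int) := by push_cast; omega
              simp [h3, hg, hyx]
            have hhc' : decide (last = ((i + 1 : Nat) : Int)) = false := by
              simp only [decide_eq_false_iff_not]; push_cast; omega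
            rw [hpok', hhc', hrest]
            simp only [acount, hyx, hpok, Bool.false_eq_true, and_false, if_false, hzx,
              ne_eq, not_true, and_true, true_and]
            simp [hzx]
    · -- a[i] ≠ x : no-op step
      rw [if_neg hyx]
      rcases hrest : a.drop (i + 1) with _ | ⟨z, r⟩
      · have hlen : i + 1 = a.length := by
          have := congrArg List.length hrest
          simp [List.length_drop] at this; omega
        have hk0 : k = 0 := by omega
        subst hk0
        simp [axRunK, acount, hyx]
      · rw [ih (i + 1) (by omega) cnt last (by push_cast; omega)]
        have hpok' : pOkB a x (i + 1) last = !decide (last = (i : Int)) := by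
          simp only [pOkB]
          have h3 : ((i + 1 : Nat) : Int) - 1 = (i : Int) := by push_cast; omega
          have h2 : i + 1 < a.length := by
            have := congrArg List.length hrest
            simp [List.length_drop] at this; omega
          simp [h3, hg, hyx, decide_not]
        have hhc' : decide (last = ((i + 1 : Nat) : Int)) = false := by
          simp only [decide_eq_false_iff_not]; push_cast; omega
        rw [hpok', hhc', hrest]
        simp only [acount, hyx, false_and, if_false, Bool.false_eq_true]
        simp [hyx]


lemma axStep_fst (a : List Int) (x : Int) (i : Nat) (st : Int × Int) :
    st.1 ≤ (axStep a x i st).1 := by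
  unfold axStep; split_ifs <;> simp

lemma axRunK_mono (a : List Int) (x : Int) :
    ∀ (k i : Nat) (st : Int × Int), st.1 ≤ (axRunK a x k i st).1 := by
  intro k
  induction k with
  | zero => intro i st; simp [axRunK]
  | succ k ih =>
    intro i st
    calc st.1 ≤ (axStep a x i st).1 := axStep_fst a x i st
      _ ≤ (axRunK a x k (i + 1) (axStep a x i st)).1 := ih (i + 1) _
      _ = (axRunK a x (k + 1) i st).1 := rfl

lemma axRunK_no_occ (a : List Int) (x : Int) :
    ∀ (k i : Nat), i + k ≤ a.length → x ∉ a.drop i → ∀ (st : Int × Int),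
      axRunK a x k i st = st := by
  intro k
  induction k with
  | zero => intro i _ _ st; rfl
  | succ k ih =>
    intro i hk hx st
    have hi : i < a.length := by omega
    have hd : a.drop i = a[i] :: a.drop (i + 1) := List.drop_eq_getElem_cons hi
    have hne : a[i] ≠ x := by intro h; exact hx (by rw [hd, h]; exact List.mem_cons_self ..)
    have hx' : x ∉ a.drop (i + 1) := fun h => hx (by rw [hd]; exact List.mem_cons_of_mem _ h)
    have hstep : axStep a x i st = st := by
      unfold axStep
      rw [pyGetD_idx a i hi, if_neg hne]
    show axRunK a x k (i + 1) (axStep a x i st) = st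
    rw [hstep, ih (i + 1) (by omega) hx' st]

lemma dic0_get (l : List Int) (x : Int) :
    ∀ (d : PySem.Dict Int (Int × Int)),
      (l.foldl (fun d n => d.insert n ((0 : Int), (-1 : Int))) d).get? x
        = if x ∈ l then some (0, -1) else d.get? x := by
  induction l with
  | nil => intro d; simp
  | cons y l ih =>
    intro d
    simp only [List.foldl_cons, ih, List.mem_cons]
    by_cases hxl : x ∈ l
    · simp [hxl]
    · by_cases hxy : x = y
      · simp [hxl, hxy, PySem.Dict.get?_insert_self]
      · simp [hxl, hxy, PySem.Dict.get?_insert_of_ne _ _ hxy]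

lemma tail_step (a : List Int) (y : Int) (k i : Nat) (hik : i + 1 + k = a.length) (c : Int)
    (S' : Int → Int × Int) (st' : Int × Int) (hS'y : S' y = st') :
    ((a.drop (i + 1)).map (fun x => (axRunK a x k (i + 1) (S' x)).1)).foldl max
        (max c ((axRunK a y k (i + 1) st').1))
      = ((a.drop (i + 1)).map (fun x => (axRunK a x k (i + 1) (S' x)).1)).foldl max
        (max c st'.1) := by
  apply foldl_max_base_eq
  · exact axRunK_mono a y k (i + 1) st'
  · by_cases hy : y ∈ a.drop (i + 1)
    · left
      exact List.mem_map.2 ⟨y, hy, by rw [hS'y]⟩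
    · right
      rw [axRunK_no_occ a y k (i + 1) (by omega) hy st']

lemma loopA (a : List Int) :
    ∀ (k i : Nat), i + k = a.length →
    ∀ (dic : PySem.Dict Int (Int × Int)) (c : Int) (S : Int → Int × Int),
      (∀ x ∈ a, dic.get? x = some (S x)) →
      ((PySem.List.pyRange (i : Int) (a.length : Int) 1).foldl (solutionStep a) (dic, c)).2
        = ((a.drop i).map (fun x => (axRunK a x k i (S x)).1)).foldl max c := by
  intro k
  induction k with
  | zero =>
    intro i hk dic c S _
    have h1 : PySem.List.pyRange (i : Int) (a.length : Int) 1 = [] :=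
      PySem.List.pyRange_one_eq_nil (by omega)
    have h2 : a.drop i = [] := by rw [List.drop_eq_nil_iff]; omega
    simp [h1, h2]
  | succ k ih =>
    intro i hk dic c S hS
    have hi : i < a.length := by omega
    have hg : PySem.List.pyGetD a (i : Int) 0 = a[i] := pyGetD_idx a i hi
    have hd : a.drop i = a[i] :: a.drop (i + 1) := List.drop_eq_getElem_cons hi
    have hy : dic.get? a[i] = some (S a[i]) := hS a[i] (a.getElem_mem hi)
    rw [PySem.List.pyRange_one_cons (by exact_mod_cast hi)]
    have hcast : (i : Int) + 1 = ((i + 1 : Nat) : Int) := by push_cast; ring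
    set st' := axStep a a[i] i (S a[i]) with hst'
    set S' : Int → Int × Int := fun v => if v = a[i] then st' else S v with hS'def
    have hmap : ∀ x ∈ a.drop (i + 1),
        (axRunK a x (k + 1) i (S x)).1 = (axRunK a x k (i + 1) (S' x)).1 := by
      intro x _
      show (axRunK a x k (i + 1) (axStep a x i (S x))).1 = _
      by_cases hxy : x = a[i]
      · subst hxy; simp [hS'def, hst']
      · have : axStep a x i (S x) = S x := by
          unfold axStep
          rw [hg, if_neg (fun h => hxy h.symm)]
        rw [this, hS'def]
        simp [hxy]
    have hstep : (List.foldl (solutionStep a) (solutionStep a (dic, c) (i : Int))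
          (PySem.List.pyRange ((i : Int) + 1) (a.length : Int) 1)).2
        = ((a.drop (i + 1)).map (fun x => (axRunK a x k (i + 1) (S' x)).1)).foldl max
          (max c st'.1) := by
      have hstep_eq : ∃ dic' : PySem.Dict Int (Int × Int),
          solutionStep a (dic, c) (i : Int) = (dic', max c st'.1) ∧
          (∀ x ∈ a, dic'.get? x = some (S' x)) := by
        have hSget : ∀ x ∈ a, ∀ v : Int × Int,
            (dic.insert a[i] v).get? x = some ((fun w => if w = a[i] then v else S w) x) := by
          intro x hx v
          by_cases hxy : x = a[i]
          · subst hxy; simp [PySem.Dict.get?_insert_self]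
          · simp [hxy, PySem.Dict.get?_insert_of_ne _ _ hxy, hS x hx]
        simp only [solutionStep, hg, hy, Option.getD_some]
        by_cases h1 : (i : Int) > 0 ∧ (S a[i]).2 ≠ (i : Int) - 1 ∧
            PySem.List.pyGetD a ((i : Int) - 1) 0 ≠ a[i]
        · refine ⟨dic.insert a[i] ((S a[i]).1 + 1, (i : Int) - 1), ?_, ?_⟩
          · rw [if_pos h1]
            have : st' = ((S a[i]).1 + 1, (i : Int) - 1) := by
              rw [hst']; unfold axStep; rw [hg, if_pos rfl, if_pos h1]
            rw [this]
          · intro x hx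
            have : st' = ((S a[i]).1 + 1, (i : Int) - 1) := by
              rw [hst']; unfold axStep; rw [hg, if_pos rfl, if_pos h1]
            rw [hS'def]; simp only [this]
            exact hSget x hx _
        · by_cases h2 : (i : Int) < (a.length : Int) - 1 ∧
              a[i] ≠ PySem.List.pyGetD a ((i : Int) + 1) 0
          · refine ⟨dic.insert a[i] ((S a[i]).1 + 1, (i : Int) + 1), ?_, ?_⟩
            · rw [if_neg h1, if_pos h2]
              have : st' = ((S a[i]).1 + 1, (i : Int) + 1) := by
                rw [hst']; unfold axStep
                rw [hg, if_pos rfl, if_neg h1, if_pos h2]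
              rw [this]
            · intro x hx
              have : st' = ((S a[i]).1 + 1, (i : Int) + 1) := by
                rw [hst']; unfold axStep
                rw [hg, if_pos rfl, if_neg h1, if_pos h2]
              rw [hS'def]; simp only [this]
              exact hSget x hx _
          · refine ⟨dic, ?_, ?_⟩
            · rw [if_neg h1, if_neg h2]
              have : st' = S a[i] := by
                rw [hst']; unfold axStep
                rw [hg, if_pos rfl, if_neg h1,
                  if_neg h2]
              rw [this]
            · intro x hx
              have hst : st' = S a[i] := by
                rw [hst']; unfold axStep
                rw [hg, if_pos rfl, if_neg h1,
                  if_neg h2]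
              rw [hS'def]
              by_cases hxy : x = a[i]
              · rw [hxy, hst]; simp [hy]
              · simp [hxy, hS x hx]
      obtain ⟨dic', heq, hS'⟩ := hstep_eq
      rw [heq, hcast]
      exact ih (i + 1) (by omega) dic' (max c st'.1) S' hS'
    rw [List.foldl_cons, hstep, hd, List.map_cons, List.foldl_cons]
    rw [List.map_congr_left hmap]
    have hgy : (axRunK a a[i] (k + 1) i (S a[i])).1 = (axRunK a a[i] k (i + 1) st').1 := rfl
    rw [hgy, tail_step a a[i] k i (by omega) c S' st' (by simp [hS'def])]


lemma per_value_count (a : List Int) (x : Int) :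
    (axRunK a x a.length 0 ((0 : Int), (-1 : Int))).1 = gcount x a := by
  have h := bis a x a.length 0 (by omega) 0 (-1) (by norm_num)
  have hpok : pOkB a x 0 (-1) = false := by simp [pOkB]
  have hhc : decide ((-1 : Int) = ((0 : Nat) : Int)) = false := by decide
  rw [h, hpok, hhc]
  simp [(acount_main x a.length a le_rfl).1]

lemma cA_eq (a : List Int) :
    ((PySem.List.pyRange 0 (a.length : Int) 1).foldl (solutionStep a)
        ((PySem.Set.ofList a).foldl (fun d n => d.insert n ((0 : Int), (-1 : Int)))
          PySem.Dict.empty, 0)).2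
      = (a.map (fun x => gcount x a)).foldl max 0 := by
  have hdic0 : ∀ x ∈ a,
      ((PySem.Set.ofList a).foldl (fun d n => d.insert n ((0 : Int), (-1 : Int)))
        PySem.Dict.empty).get? x = some ((fun _ : Int => ((0 : Int), (-1 : Int))) x) := by
    intro x hx
    rw [dic0_get]
    simp [(PySem.Set.mem_ofList a x).2 hx]
  have hA := loopA a a.length 0 (by omega) _ 0 (fun _ => ((0 : Int), (-1 : Int))) hdic0
  simp only [Nat.cast_zero, List.drop_zero] at hA
  rw [hA, List.map_congr_left (fun x _ => per_value_count a x)]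

lemma cB_eq (a : List Int) :
    ((PySem.Set.ofList a).foldl (fun best x => max best (solutionAltCount a x 0 0)) 0)
      = ((PySem.Set.ofList a).map (fun x => gcount x a)).foldl max 0 := by
  rw [← List.foldl_map]
  congr 1
  apply List.map_congr_left
  intro x _
  have := countBridge a x a.length 0 0 (by omega)
  simpa using this

theorem solution_spec : Claim_equal_solution := by
  unfold Claim_equal_solution Spec_solution
  intro a _
  show solution a = solution_alt a
  simp only [solution, solution_alt]
  rw [cA_eq a, cB_eq a]
  have hmem : ∀ v : Int, v ∈ a.map (fun x => gcount x a) ↔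
      v ∈ (PySem.Set.ofList a).map (fun x => gcount x a) := by
    intro v
    simp only [List.mem_map, PySem.Set.mem_ofList _ _]
  rw [foldl_max_congr _ _ _ hmem]
  have hbound : ((PySem.Set.ofList a).map (fun x => gcount x a)).foldl max 0 * 2
      ≤ (a.length : Int) := by
    have hX : ((PySem.Set.ofList a).map (fun x => gcount x a)).foldl max 0
        ≤ (a.length : Int) / 2 := by
      refine (foldl_max_le_iff _ _ _).2 ⟨by positivity, ?_⟩
      intro u hu
      obtain ⟨x, _, rfl⟩ := List.mem_map.1 hu
      have := (gcount_bounds x a.length a le_rfl).2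
      omega
    omega
  rw [if_pos (by omega)]
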